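-- pv_equiv track=rewrite | github.com/kraker/sips-and-steals | generate_site.py | group_restaurants_by_metro_area
-- ===== SOURCE A (Python) =====
-- def group_restaurants_by_metro_area(restaurants_dict):
--     """Group restaurants by metro area for template rendering"""
--     metro_areas = {}
--     for slug, restaurant in restaurants_dict.items():
--         metro_area = restaurant.get('metro_area', 'Denver Metro')
--         if metro_area not in metro_areas:
--             metro_areas[metro_area] = {}
--         metro_areas[metro_area][slug] = restaurant
--
--     # Sort metro areas (Denver Metro first, then Boulder)
--     sorted_areas = []
--     if 'Denver Metro' in metro_areas:
--         sorted_areas.append(('Denver Metro', metro_areas['Denver Metro']))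
--     if 'Boulder' in metro_areas:
--         sorted_areas.append(('Boulder', metro_areas['Boulder']))
--
--     return sorted_areas
-- ===== SOURCE B (Python) =====
-- def group_restaurants_by_metro_area(restaurants_dict):
--     """Group restaurants by metro area for template rendering"""
--     denver = {slug: r for slug, r in restaurants_dict.items()
--               if r.get('metro_area', 'Denver Metro') == 'Denver Metro'}
--     boulder = {slug: r for slug, r in restaurants_dict.items()
--                if r.get('metro_area', 'Denver Metro') == 'Boulder'}
--     result = []
--     if denver:
--         result.append(('Denver Metro', denver))
--     if boulder:
--         result.append(('Boulder', boulder))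
--     return result
-- ===== Notes on version B (the rewrite author's own statement) =====
-- stated objective: simpler
-- what changed: Replaces the general group-by-all-metro-areas dict of dicts plus two lookups with two direct filtered dict comprehensions (one per target bucket) appended in fixed order when non-empty.
import Mathlib
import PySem

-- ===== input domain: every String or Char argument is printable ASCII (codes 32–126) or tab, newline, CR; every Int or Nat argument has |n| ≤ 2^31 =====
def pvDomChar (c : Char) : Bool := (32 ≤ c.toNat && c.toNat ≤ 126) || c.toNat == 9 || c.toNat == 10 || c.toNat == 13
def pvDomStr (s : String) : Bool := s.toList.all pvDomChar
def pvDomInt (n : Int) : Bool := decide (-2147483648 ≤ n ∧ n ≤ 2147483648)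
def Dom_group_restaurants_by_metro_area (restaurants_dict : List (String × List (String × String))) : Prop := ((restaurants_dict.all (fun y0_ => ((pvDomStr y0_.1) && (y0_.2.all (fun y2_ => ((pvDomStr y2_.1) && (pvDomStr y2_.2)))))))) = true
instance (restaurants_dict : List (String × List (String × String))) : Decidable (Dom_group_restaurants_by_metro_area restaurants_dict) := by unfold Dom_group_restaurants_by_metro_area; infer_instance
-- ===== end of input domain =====

-- B drops the general group-by-every-metro-area dict of dicts and instead builds the two
-- target buckets directly as filtered dict comprehensions, appended in fixed order when
-- non-empty; same O(n) cost, simpler decomposition.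

-- ===== PORT A =====
def group_restaurants_by_metro_area (restaurants_dict : List (String × List (String × String))) : List (String × (List (String × List (String × String)))) :=
  let metro_areas : PySem.Dict String (PySem.Dict String (List (String × String))) :=
    restaurants_dict.foldl (fun ma p =>
      let metro_area := (PySem.Dict.mk p.2).getD "metro_area" "Denver Metro"
      let ma := if ma.contains metro_area then ma else ma.insert metro_area PySem.Dict.empty
      ma.insert metro_area ((ma.getD metro_area PySem.Dict.empty).insert p.1 p.2)) PySem.Dict.empty
  (if metro_areas.contains "Denver Metro" then
      [("Denver Metro", (metro_areas.getD "Denver Metro" PySem.Dict.empty).items)] else []) ++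
  (if metro_areas.contains "Boulder" then
      [("Boulder", (metro_areas.getD "Boulder" PySem.Dict.empty).items)] else [])

-- ===== PORT B =====
def group_restaurants_by_metro_area_alt (restaurants_dict : List (String × List (String × String))) : List (String × (List (String × List (String × String)))) :=
  let denver := PySem.Dict.ofList (restaurants_dict.filter
    (fun p => (PySem.Dict.mk p.2).getD "metro_area" "Denver Metro" == "Denver Metro"))
  let boulder := PySem.Dict.ofList (restaurants_dict.filter
    (fun p => (PySem.Dict.mk p.2).getD "metro_area" "Denver Metro" == "Boulder"))
  (if denver.items.isEmpty then [] else [("Denver Metro", denver.items)]) ++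
  (if boulder.items.isEmpty then [] else [("Boulder", boulder.items)])

-- ===== PRECONDITION & SPEC =====
def Spec_group_restaurants_by_metro_area (restaurants_dict : List (String × List (String × String))) (out : List (String × (List (String × List (String × String))))) : Prop := out = group_restaurants_by_metro_area_alt restaurants_dict
instance (restaurants_dict : List (String × List (String × String))) (out : List (String × (List (String × List (String × String))))) : Decidable (Spec_group_restaurants_by_metro_area restaurants_dict out) := by unfold Spec_group_restaurants_by_metro_area; infer_instance

-- ===== CLAIM (what is proved, stated in full; the proofs are below) =====
def Claim_equal_group_restaurants_by_metro_area : Prop := ∀ (restaurants_dict : List (String × List (String × String))), Dom_group_restaurants_by_metro_area restaurants_dict → Spec_group_restaurants_by_metro_area restaurants_dict (group_restaurants_by_metro_area restaurants_dict)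

-- ===== LEMMAS AND PROOFS =====

-- The metro key of one restaurant, and A's loop body, as named proof-side abbreviations
-- (definitionally equal to the lambdas occurring in the ports).
def pvMetro (r : List (String × String)) : String :=
  (PySem.Dict.mk r).getD "metro_area" "Denver Metro"

def pvStep (ma : PySem.Dict String (PySem.Dict String (List (String × String))))
    (p : String × List (String × String)) : PySem.Dict String (PySem.Dict String (List (String × String))) :=
  let metro_area := (PySem.Dict.mk p.2).getD "metro_area" "Denver Metro"
  let ma := if ma.contains metro_area then ma else ma.insert metro_area PySem.Dict.empty
  ma.insert metro_area ((ma.getD metro_area PySem.Dict.empty).insert p.1 p.2)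

def pvIns (d : PySem.Dict String (List (String × String))) (p : String × List (String × String)) :
    PySem.Dict String (List (String × String)) := d.insert p.1 p.2

def pvBucket (k : String) (l : List (String × List (String × String))) :
    List (String × List (String × String)) := l.filter (fun p => pvMetro p.2 == k)

theorem pvStep_eq (ma : PySem.Dict String (PySem.Dict String (List (String × String))))
    (p : String × List (String × String)) :
    pvStep ma p = ma.insert (pvMetro p.2) (pvIns (ma.getD (pvMetro p.2) PySem.Dict.empty) p) := by
  unfold pvStep pvMetro pvIns
  by_cases h : ma.contains ((PySem.Dict.mk p.2).getD "metro_area" "Denver Metro") = true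
  · simp [h]
  · simp only [Bool.not_eq_true] at h
    simp [h, PySem.Dict.getD_insert_self, PySem.Dict.getD_of_not_contains _ _ h,
      PySem.Dict.insert_insert_self]

theorem pvFold_contains (l : List (String × List (String × String)))
    (ma : PySem.Dict String (PySem.Dict String (List (String × String)))) (k : String) :
    (l.foldl pvStep ma).contains k = (ma.contains k || !(pvBucket k l).isEmpty) := by
  induction l generalizing ma with
  | nil => simp [pvBucket]
  | cons p l ih =>
    rw [List.foldl_cons, ih, pvStep_eq, PySem.Dict.contains_insert]
    by_cases h : pvMetro p.2 = k
    · simp [pvBucket, h]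
    · have : (k == pvMetro p.2) = false := by simp [Ne.symm h]
      simp [pvBucket, this, h]

theorem pvFold_getD (l : List (String × List (String × String)))
    (ma : PySem.Dict String (PySem.Dict String (List (String × String)))) (k : String) :
    (l.foldl pvStep ma).getD k PySem.Dict.empty
      = (pvBucket k l).foldl pvIns (ma.getD k PySem.Dict.empty) := by
  induction l generalizing ma with
  | nil => simp [pvBucket]
  | cons p l ih =>
    rw [List.foldl_cons, ih, pvStep_eq]
    by_cases h : pvMetro p.2 = k
    · subst h; simp [pvBucket, PySem.Dict.getD_insert_self]
    · have hne : k ≠ pvMetro p.2 := Ne.symm h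
      simp [pvBucket, h, PySem.Dict.getD_insert_of_ne _ _ _ hne]

theorem pvOfList_eq_foldl (l : List (String × List (String × String))) :
    PySem.Dict.ofList l = l.foldl pvIns PySem.Dict.empty := rfl

theorem pvFoldIns_items_ne_nil (l : List (String × List (String × String)))
    (d : PySem.Dict String (List (String × String))) (h : d.items ≠ []) :
    (l.foldl pvIns d).items ≠ [] := by
  induction l generalizing d with
  | nil => exact h
  | cons p l ih =>
    refine ih _ ?_
    rw [pvIns, PySem.Dict.items_insert]
    by_cases hc : d.contains p.1 = true
    · simp [hc, h]
    · simp only [Bool.not_eq_true] at hc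
      simp [hc]

theorem pvOfList_isEmpty (l : List (String × List (String × String))) :
    (PySem.Dict.ofList l).items.isEmpty = l.isEmpty := by
  cases l with
  | nil => rfl
  | cons p l =>
    simp only [List.isEmpty_cons]
    rw [List.isEmpty_eq_false_iff]
    rw [pvOfList_eq_foldl, List.foldl_cons]
    refine pvFoldIns_items_ne_nil _ _ ?_
    rw [pvIns, PySem.Dict.items_insert]
    simp [PySem.Dict.contains_empty]

-- ===== VERDICT (by name: the statement is the Claim_ definition above) =====
theorem group_restaurants_by_metro_area_spec : Claim_equal_group_restaurants_by_metro_area := by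
  intro rd _
  show group_restaurants_by_metro_area rd = group_restaurants_by_metro_area_alt rd
  have hA : group_restaurants_by_metro_area rd =
      (if (rd.foldl pvStep PySem.Dict.empty).contains "Denver Metro" then
          [("Denver Metro", ((rd.foldl pvStep PySem.Dict.empty).getD "Denver Metro" PySem.Dict.empty).items)] else []) ++
      (if (rd.foldl pvStep PySem.Dict.empty).contains "Boulder" then
          [("Boulder", ((rd.foldl pvStep PySem.Dict.empty).getD "Boulder" PySem.Dict.empty).items)] else []) := rfl
  have hB : group_restaurants_by_metro_area_alt rd =
      (if (PySem.Dict.ofList (pvBucket "Denver Metro" rd)).items.isEmpty then []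
        else [("Denver Metro", (PySem.Dict.ofList (pvBucket "Denver Metro" rd)).items)]) ++
      (if (PySem.Dict.ofList (pvBucket "Boulder" rd)).items.isEmpty then []
        else [("Boulder", (PySem.Dict.ofList (pvBucket "Boulder" rd)).items)]) := rfl
  rw [hA, hB]
  have key : ∀ k : String,
      ((rd.foldl pvStep PySem.Dict.empty).contains k = !(pvBucket k rd).isEmpty) ∧
      ((rd.foldl pvStep PySem.Dict.empty).getD k PySem.Dict.empty = PySem.Dict.ofList (pvBucket k rd)) := by
    intro k
    constructor
    · rw [pvFold_contains]; simp [PySem.Dict.contains_empty]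
    · rw [pvFold_getD, pvOfList_eq_foldl]; simp [PySem.Dict.getD_empty]
  rw [(key _).1, (key _).2, (key _).1, (key _).2, pvOfList_isEmpty, pvOfList_isEmpty]
  by_cases h1 : (pvBucket "Denver Metro" rd).isEmpty <;>
    by_cases h2 : (pvBucket "Boulder" rd).isEmpty <;> simp [h1, h2]
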